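-- pv_equiv track=rewrite | github.com/kirant1994/functions | sequence_processing.py | collapse_sequence
-- ===== SOURCE A (Python) =====
-- def collapse_sequence(arr, blank=None):
-- 	if len(arr) == 0:
-- 		return arr
-- 	arr_collapsed = [arr[0]]
-- 	prev_item = arr_collapsed[0]
-- 	for item in arr[1:]:
-- 		if item != prev_item and item != blank:
-- 			arr_collapsed.append(item)
-- 		prev_item = item
-- 	return arr_collapsed
-- ===== SOURCE B (Python) =====
-- def collapse_sequence(arr, blank=None):
-- 	if not arr:
-- 		return arr
-- 	groups = [arr[0]] + [b for a, b in zip(arr, arr[1:]) if b != a]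
-- 	return groups[:1] + [g for g in groups[1:] if g != blank]
-- ===== Notes on version B (the rewrite author's own statement) =====
-- stated objective: idiomatic
-- what changed: Replaced the stateful loop (prev_item accumulator with interleaved dedup+blank test) by a two-stage decomposition: collapse consecutive duplicates via a pairwise zip comprehension, then filter blanks from everything after the first element.
import Mathlib
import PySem

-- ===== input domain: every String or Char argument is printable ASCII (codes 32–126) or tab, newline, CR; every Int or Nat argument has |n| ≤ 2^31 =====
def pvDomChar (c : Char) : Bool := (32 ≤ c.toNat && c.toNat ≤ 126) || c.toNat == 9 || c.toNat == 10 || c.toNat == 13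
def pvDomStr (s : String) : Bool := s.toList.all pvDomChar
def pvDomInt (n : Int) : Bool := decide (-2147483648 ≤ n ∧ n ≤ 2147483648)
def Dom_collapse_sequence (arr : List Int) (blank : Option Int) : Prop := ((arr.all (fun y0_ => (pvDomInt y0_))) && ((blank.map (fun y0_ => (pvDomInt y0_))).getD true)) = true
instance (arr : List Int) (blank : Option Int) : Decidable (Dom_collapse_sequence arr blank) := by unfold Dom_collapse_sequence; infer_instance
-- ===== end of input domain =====

-- B replaces A's stateful single loop by an idiomatic two-stage decomposition: collapse consecutive duplicates via pairwise zip, then filter blanks from the tail.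


-- ===== PORT A =====
-- Python's `item != blank` with blank : Option Int (None compares unequal to every int) is `blank ≠ some item`.
def collapse_sequence (arr : List Int) (blank : Option Int) : List Int :=
  match arr with
  | [] => arr
  | a :: rest =>
    (rest.foldl
      (fun (st : List Int × Int) item =>
        if item ≠ st.2 ∧ blank ≠ some item then (st.1 ++ [item], item) else (st.1, item))
      ([a], a)).1

-- ===== PORT B =====
def collapse_sequence_alt (arr : List Int) (blank : Option Int) : List Int :=
  match arr with
  | [] => arr
  | a :: rest =>
    let groups : List Int :=
      a :: (((a :: rest).zip rest).filter (fun p => decide (p.2 ≠ p.1))).map Prod.snd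
    groups.take 1 ++ (groups.drop 1).filter (fun g => decide (blank ≠ some g))

-- ===== PRECONDITION & SPEC =====
def Spec_collapse_sequence (arr : List Int) (blank : Option Int) (out : List Int) : Prop := out = collapse_sequence_alt arr blank
instance (arr : List Int) (blank : Option Int) (out : List Int) : Decidable (Spec_collapse_sequence arr blank out) := by unfold Spec_collapse_sequence; infer_instance

-- ===== CLAIM (what is proved, stated in full; the proofs are below) =====
def Claim_equal_collapse_sequence : Prop := ∀ (arr : List Int) (blank : Option Int), Dom_collapse_sequence arr blank → Spec_collapse_sequence arr blank (collapse_sequence arr blank)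

-- ===== LEMMAS AND PROOFS =====
-- Loop invariant: A's fold appends exactly the blank-filtered group keys of prev::rest.
theorem collapse_loop (blank : Option Int) :
    ∀ (rest : List Int) (prev : Int) (acc : List Int),
      (rest.foldl
        (fun (st : List Int × Int) item =>
          if item ≠ st.2 ∧ blank ≠ some item then (st.1 ++ [item], item) else (st.1, item))
        (acc, prev)).1
      = acc ++ (((((prev :: rest).zip rest).filter (fun p => decide (p.2 ≠ p.1))).map Prod.snd).filter
          (fun g => decide (blank ≠ some g))) := by
  intro rest
  induction rest with
  | nil => intro prev acc; simp
  | cons b rest' ih =>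
    intro prev acc
    simp only [List.foldl_cons, List.zip_cons_cons, List.filter_cons]
    by_cases hb : b ≠ prev ∧ blank ≠ some b
    · have h1 : decide ((prev, b).2 ≠ (prev, b).1) = true := by simp [hb.1]
      rw [if_pos hb]
      simp only [h1, if_pos]
      rw [ih]
      simp [hb.2]
    · rw [if_neg hb]
      by_cases h1 : b = prev
      · simp only [h1]
        have : decide ((prev, prev).2 ≠ (prev, prev).1) = false := by simp
        simp only [this, Bool.false_eq_true, if_false]
        exact ih prev acc
      · have h2 : blank = some b := by
          by_contra h2; exact hb ⟨h1, h2⟩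
        have hd : decide ((prev, b).2 ≠ (prev, b).1) = true := by simp [h1]
        simp only [hd, if_pos]
        rw [ih]
        simp [h2]

-- ===== VERDICT (by name: the statement is the Claim_ definition above) =====
theorem collapse_sequence_spec : Claim_equal_collapse_sequence := by
  intro arr blank _
  unfold Spec_collapse_sequence collapse_sequence collapse_sequence_alt
  match arr with
  | [] => rfl
  | a :: rest =>
    simp only []
    rw [collapse_loop]
    simp
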